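-- pv_equiv track=rewrite | github.com/GermanGerken/augmentation_url | augmentation.py | SessNum
-- ===== SOURCE A (Python) =====
-- def SessNum(x):
--     # Not optimized
--     acc = []
--     sess_num = 0
--
--     if x[0] == 1:
--         acc.append(sess_num)
--         for i in x[1:]:
--             if i == 0:
--                 acc.append(sess_num)
--             else:
--                 sess_num += 1
--                 acc.append(sess_num)
--     else:
--         for i in x:
--             if i == 0:
--                 acc.append(sess_num)
--             else:
--                 sess_num += 1
--                 acc.append(sess_num)
--     return acc
-- ===== SOURCE B (Python) =====
-- def SessNum(x):
--     # map -> prefix-sum scan -> uniform shift, instead of A's branch-specific in-loop increments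
--     shift = 1 if x[0] == 1 else 0
--     bits = [0 if e == 0 else 1 for e in x]
--     acc = []
--     s = 0
--     for b in bits:
--         s += b
--         acc.append(s)
--     return [c - shift for c in acc]
-- ===== Notes on version B (the rewrite author's own statement) =====
-- stated objective: alternative
-- what changed: B replaces A's first-element special case and conditional in-loop increments by a three-stage pipeline: map to 0/1 bits, one uniform prefix-sum scan, then a single global shift (subtract 1 everywhere iff x[0]==1).
import Mathlib
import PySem

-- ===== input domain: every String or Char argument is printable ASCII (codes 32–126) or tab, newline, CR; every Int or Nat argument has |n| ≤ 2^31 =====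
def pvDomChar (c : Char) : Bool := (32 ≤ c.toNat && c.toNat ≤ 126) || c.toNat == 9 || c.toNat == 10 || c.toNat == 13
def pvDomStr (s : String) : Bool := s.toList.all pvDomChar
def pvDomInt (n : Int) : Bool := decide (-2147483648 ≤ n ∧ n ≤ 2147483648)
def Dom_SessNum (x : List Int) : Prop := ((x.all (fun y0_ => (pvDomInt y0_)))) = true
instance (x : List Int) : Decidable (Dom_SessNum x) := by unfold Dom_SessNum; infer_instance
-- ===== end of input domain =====

-- B replaces A's first-element special case and branch-specific increments by a
-- map→prefix-sum-scan→uniform-shift pipeline; same O(n) cost, different decomposition.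


-- ===== PORT A =====
-- A's loop body: append sess (i=0) or sess+1 (i≠0), threading sess.
def sessLoopA (xs : List Int) (sess : Int) (acc : List Int) : List Int :=
  match xs with
  | [] => acc
  | i :: rest =>
      if i = 0 then sessLoopA rest sess (acc ++ [sess])
      else sessLoopA rest (sess + 1) (acc ++ [sess + 1])

def SessNum (x : List Int) : List Int :=
  match PySem.List.pyGet? x 0 with     -- x[0]; none = IndexError, excluded by Pre_
  | none => []
  | some x0 =>
      if x0 = 1 then sessLoopA (PySem.List.slice x (some 1) none) 0 ([] ++ [(0 : Int)])
      else sessLoopA x 0 []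

-- ===== PORT B =====
-- B's scan loop: running sum s, appending each partial sum.
def scanLoopB (bits : List Int) (s : Int) (acc : List Int) : List Int :=
  match bits with
  | [] => acc
  | b :: rest => scanLoopB rest (s + b) (acc ++ [s + b])

def SessNum_alt (x : List Int) : List Int :=
  match PySem.List.pyGet? x 0 with     -- x[0]; none = IndexError, excluded by Pre_
  | none => []
  | some x0 =>
      let shift : Int := if x0 = 1 then 1 else 0
      let bits : List Int := x.map (fun e => if e = 0 then 0 else 1)
      let acc := scanLoopB bits 0 []
      acc.map (fun c => c - shift)

-- ===== PRECONDITION & SPEC =====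
-- Pre_ excludes only the empty list, on which A raises IndexError at x[0].
def Pre_SessNum (x : List Int) : Prop := x ≠ []
instance (x : List Int) : Decidable (Pre_SessNum x) := by unfold Pre_SessNum; infer_instance
def pvWitness_SessNum : List Int := [1, 0, 2, 0]

def Spec_SessNum (x : List Int) (out : List Int) : Prop := out = SessNum_alt x
instance (x : List Int) (out : List Int) : Decidable (Spec_SessNum x out) := by unfold Spec_SessNum; infer_instance

-- ===== CLAIM (what is proved, stated in full; the proofs are below) =====
def Claim_equal_SessNum : Prop := ∀ (x : List Int), Dom_SessNum x → Pre_SessNum x → Spec_SessNum x (SessNum x)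

-- ===== LEMMAS AND PROOFS =====

-- reference scan: session numbers of xs starting from sess
def scanRef (xs : List Int) (sess : Int) : List Int :=
  match xs with
  | [] => []
  | i :: rest =>
      let s' := if i = 0 then sess else sess + 1
      s' :: scanRef rest s'

theorem sessLoopA_eq (xs : List Int) : ∀ (sess : Int) (acc : List Int),
    sessLoopA xs sess acc = acc ++ scanRef xs sess := by
  induction xs with
  | nil => intro sess acc; simp [sessLoopA, scanRef]
  | cons i rest ih =>
      intro sess acc
      by_cases h : i = 0 <;> simp [sessLoopA, scanRef, h, ih]

theorem scanLoopB_eq (xs : List Int) : ∀ (s : Int) (acc : List Int),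
    scanLoopB (xs.map (fun e => if e = 0 then 0 else 1)) s acc = acc ++ scanRef xs s := by
  induction xs with
  | nil => intro s acc; simp [scanLoopB, scanRef]
  | cons i rest ih =>
      intro s acc
      by_cases h : i = 0 <;> simp [scanLoopB, scanRef, h, ih]

theorem scanRef_map_sub (xs : List Int) : ∀ (s t : Int),
    (scanRef xs s).map (fun c => c - t) = scanRef xs (s - t) := by
  induction xs with
  | nil => intro s t; simp [scanRef]
  | cons i rest ih =>
      intro s t
      by_cases h : i = 0 <;> simp [scanRef, h, ih, add_sub_right_comm]

-- ===== VERDICT (by name: the statement is the Claim_ definition above) =====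
theorem SessNum_spec : Claim_equal_SessNum := by
  intro x _ hpre
  unfold Spec_SessNum SessNum SessNum_alt
  match x, hpre with
  | x0 :: rest, _ =>
    have hB := scanLoopB_eq (x0 :: rest) 0 []
    simp only [List.nil_append, List.map] at hB
    simp only [PySem.List.pyGet?, PySem.List.pyIdx?, List.length_cons]
    norm_num [hB, PySem.List.slice_from_one, sessLoopA_eq]
    by_cases h : x0 = 1
    · subst h
      rw [scanRef_map_sub]
      norm_num [scanRef]
    · simp [h]
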